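-- pv_equiv track=rewrite | github.com/LUKASS111/Jarvis-V0.19 | scripts/gui_functionality_test.py | _identify_access_method
-- ===== SOURCE A (Python) =====
-- def _identify_access_method(function_name):
--     """Identify how function is accessed through GUI"""
--     access_methods = {
--         'chat_': 'Chat Interface Tab',
--         'model_': 'AI Models Tab',
--         'file_': 'Multimodal Processing Tab',
--         'upload_': 'File Upload Interface',
--         'database_': 'Memory Management Tab',
--         'memory_': 'Memory Management Tab',
--         'workflow_': 'Workflow Designer Tab',
--         'agent_': 'Agent Management Tab',
--         'monitor_': 'System Monitoring Tab',
--         'config_': 'Configuration Tab',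
--         'setting_': 'Settings Interface'
--     }
--
--     for pattern, method in access_methods.items():
--         if function_name.lower().startswith(pattern):
--             return method
--
--     return 'Dashboard Interface'
-- ===== SOURCE B (Python) =====
-- def _identify_access_method(function_name):
--     """Identify how function is accessed through GUI"""
--     access_methods = {
--         'chat_': 'Chat Interface Tab',
--         'model_': 'AI Models Tab',
--         'file_': 'Multimodal Processing Tab',
--         'upload_': 'File Upload Interface',
--         'database_': 'Memory Management Tab',
--         'memory_': 'Memory Management Tab',
--         'workflow_': 'Workflow Designer Tab',
--         'agent_': 'Agent Management Tab',
--         'monitor_': 'System Monitoring Tab',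
--         'config_': 'Configuration Tab',
--         'setting_': 'Settings Interface'
--     }
--
--     name = function_name.lower()
--     idx = name.find('_')
--     if idx == -1:
--         return 'Dashboard Interface'
--     return access_methods.get(name[:idx + 1], 'Dashboard Interface')
-- ===== Notes on version B (the rewrite author's own statement) =====
-- stated objective: idiomatic
-- what changed: B replaces A's linear scan over the 11-entry prefix dict with startswith tests by extracting the prefix up to and including the first underscore of the lowercased name and doing a single dict lookup with the same default.
import Mathlib
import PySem

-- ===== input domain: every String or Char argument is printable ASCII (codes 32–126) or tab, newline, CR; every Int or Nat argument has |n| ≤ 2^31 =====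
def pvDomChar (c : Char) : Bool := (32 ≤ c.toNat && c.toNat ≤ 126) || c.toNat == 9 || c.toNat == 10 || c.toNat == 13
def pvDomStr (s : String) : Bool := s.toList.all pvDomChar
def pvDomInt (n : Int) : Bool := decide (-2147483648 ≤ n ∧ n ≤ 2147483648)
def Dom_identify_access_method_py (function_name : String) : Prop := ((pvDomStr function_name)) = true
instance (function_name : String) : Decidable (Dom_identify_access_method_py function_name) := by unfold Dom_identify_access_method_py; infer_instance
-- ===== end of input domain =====

-- B replaces A's linear scan of startswith checks by extracting the prefix up to the
-- first '_' and doing a single dict lookup (same dict, same default): more idiomatic.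

-- the prefix → access-method table both Pythons write as a dict literal
def pvAccessDict : PySem.Dict String String := PySem.Dict.ofList
  [("chat_", "Chat Interface Tab"),
   ("model_", "AI Models Tab"),
   ("file_", "Multimodal Processing Tab"),
   ("upload_", "File Upload Interface"),
   ("database_", "Memory Management Tab"),
   ("memory_", "Memory Management Tab"),
   ("workflow_", "Workflow Designer Tab"),
   ("agent_", "Agent Management Tab"),
   ("monitor_", "System Monitoring Tab"),
   ("config_", "Configuration Tab"),
   ("setting_", "Settings Interface")]

-- ===== PORT A =====
-- A's loop: for pattern, method in access_methods.items(): if function_name.lower().startswith(pattern): return method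
def pvLoopA (function_name : String) : List (String × String) → String
  | [] => "Dashboard Interface"
  | (pattern, method) :: rest =>
      if PySem.Str.startswith (PySem.Str.lower function_name) pattern then method
      else pvLoopA function_name rest

def identify_access_method_py (function_name : String) : String :=
  pvLoopA function_name pvAccessDict.items

-- ===== PORT B =====
def identify_access_method_py_alt (function_name : String) : String :=
  let name := PySem.Str.lower function_name
  let idx := PySem.Str.find name "_"
  if idx == -1 then "Dashboard Interface"
  else pvAccessDict.getD (PySem.Str.slice name none (some (idx + 1))) "Dashboard Interface"

-- ===== PRECONDITION & SPEC =====
def Spec_identify_access_method_py (function_name : String) (out : String) : Prop := out = identify_access_method_py_alt function_name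
instance (function_name : String) (out : String) : Decidable (Spec_identify_access_method_py function_name out) := by unfold Spec_identify_access_method_py; infer_instance

-- ===== CLAIM (what is proved, stated in full; the proofs are below) =====
def Claim_equal_identify_access_method_py : Prop := ∀ (function_name : String), Dom_identify_access_method_py function_name → Spec_identify_access_method_py function_name (identify_access_method_py function_name)

-- ===== LEMMAS AND PROOFS =====

-- [a] is a prefix of l.drop i exactly when l[i]? = some a
lemma pv_singleton_prefix_iff (a : Char) (l : List Char) (i : ℕ) :
    [a] <+: l.drop i ↔ l[i]? = some a := by
  constructor
  · rintro ⟨t, ht⟩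
    have h0 : (l.drop i)[0]? = some a := by rw [← ht]; rfl
    simpa using h0
  · intro h
    obtain ⟨hi, he⟩ := List.getElem?_eq_some_iff.mp h
    exact ⟨l.drop (i + 1), by rw [List.drop_eq_getElem_cons hi, he]; rfl⟩

-- with j the first index of '_' in l, a pattern q ++ ['_'] ('_' ∉ q) starts l iff it IS l.take (j+1)
lemma pv_cond_iff (l : List Char) (j : ℕ) (hj : l[j]? = some '_')
    (hmin : ∀ i, i < j → l[i]? ≠ some '_') (q : List Char) (hq : '_' ∉ q) :
    (q ++ ['_'] <+: l) ↔ l.take (j + 1) = q ++ ['_'] := by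
  constructor
  · rintro ⟨t, ht⟩
    have hlq : l[q.length]? = some '_' := by
      rw [← ht]; simp
    have hje : j = q.length := by
      rcases lt_trichotomy j q.length with h | h | h
      · exfalso
        have : l[j]? = q[j]? := by rw [← ht]; simp [List.getElem?_append_left h]
        rw [hj] at this
        exact hq (List.mem_of_getElem? this.symm)
      · exact h
      · exact absurd hlq (hmin _ h)
    subst hje
    rw [← ht]
    rw [show q.length + 1 = q.length + ['_'].length + t.length.min 0 by simp]
    simp [List.take_append]
  · intro h
    exact h ▸ List.take_prefix (j + 1) l

-- the Bool condition A tests for one dict entry equals the Bool condition B's lookup tests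
lemma pv_cond_eq (name key p : String) (j : ℕ)
    (hkey : key.toList = name.toList.take (j + 1))
    (hj : name.toList[j]? = some '_')
    (hmin : ∀ i, i < j → name.toList[i]? ≠ some '_')
    (q : List Char) (hp : p.toList = q ++ ['_']) (hq : '_' ∉ q) :
    PySem.Str.startswith name p = (p == key) := by
  rw [Bool.eq_iff_iff, PySem.Str.startswith_eq, PySem.Chars.startswith_iff, hp, beq_iff_eq,
    pv_cond_iff _ j hj hmin q hq, ← hp, ← hkey, String.ext_iff]
  exact eq_comm

-- when '_' does not occur in name, A's startswith test is false for every dict pattern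
lemma pv_cond_false (name p : String) (q : List Char) (hp : p.toList = q ++ ['_'])
    (hno : ¬ ['_'] <:+: name.toList) :
    PySem.Str.startswith name p = false := by
  rw [Bool.eq_false_iff, Ne, PySem.Str.startswith_eq]
  intro h
  rw [PySem.Chars.startswith_iff, hp] at h
  exact hno (((List.suffix_append q ['_']).isInfix).trans h.isInfix)

-- ===== VERDICT (by name: the statement is the Claim_ definition above) =====
set_option maxHeartbeats 2000000 in
theorem identify_access_method_py_spec : Claim_equal_identify_access_method_py := by
  intro fn _
  simp only [Spec_identify_access_method_py, identify_access_method_py,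
    identify_access_method_py_alt]
  have hitems : pvAccessDict.items =
      [("chat_", "Chat Interface Tab"), ("model_", "AI Models Tab"),
       ("file_", "Multimodal Processing Tab"), ("upload_", "File Upload Interface"),
       ("database_", "Memory Management Tab"), ("memory_", "Memory Management Tab"),
       ("workflow_", "Workflow Designer Tab"), ("agent_", "Agent Management Tab"),
       ("monitor_", "System Monitoring Tab"), ("config_", "Configuration Tab"),
       ("setting_", "Settings Interface")] := rfl
  have hmk : pvAccessDict = PySem.Dict.mk pvAccessDict.items := rfl
  have hfind : PySem.Str.find (PySem.Str.lower fn) "_"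
      = PySem.Chars.find (PySem.Str.lower fn).toList ['_'] := PySem.Str.find_eq _ _
  rw [hfind]
  by_cases hneg : PySem.Chars.find (PySem.Str.lower fn).toList ['_'] = -1
  · -- no underscore in the lowered name: every startswith test fails, B takes its default
    have hno : ¬ ['_'] <:+: (PySem.Str.lower fn).toList :=
      (PySem.Chars.find_eq_neg_one_iff _ _).mp hneg
    rw [if_pos (by simpa using hneg), hitems]
    simp only [pvLoopA,
      pv_cond_false (PySem.Str.lower fn) "chat_" ['c','h','a','t'] (by decide) hno,
      pv_cond_false (PySem.Str.lower fn) "model_" ['m','o','d','e','l'] (by decide) hno,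
      pv_cond_false (PySem.Str.lower fn) "file_" ['f','i','l','e'] (by decide) hno,
      pv_cond_false (PySem.Str.lower fn) "upload_" ['u','p','l','o','a','d'] (by decide) hno,
      pv_cond_false (PySem.Str.lower fn) "database_" ['d','a','t','a','b','a','s','e'] (by decide) hno,
      pv_cond_false (PySem.Str.lower fn) "memory_" ['m','e','m','o','r','y'] (by decide) hno,
      pv_cond_false (PySem.Str.lower fn) "workflow_" ['w','o','r','k','f','l','o','w'] (by decide) hno,
      pv_cond_false (PySem.Str.lower fn) "agent_" ['a','g','e','n','t'] (by decide) hno,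
      pv_cond_false (PySem.Str.lower fn) "monitor_" ['m','o','n','i','t','o','r'] (by decide) hno,
      pv_cond_false (PySem.Str.lower fn) "config_" ['c','o','n','f','i','g'] (by decide) hno,
      pv_cond_false (PySem.Str.lower fn) "setting_" ['s','e','t','t','i','n','g'] (by decide) hno,
      Bool.false_eq_true, if_false]
  · -- underscore found: the pattern the scan hits is exactly B's lookup key
    rw [if_neg (by simpa using hneg)]
    have hspec := PySem.Chars.findFrom_natCast_spec (PySem.Str.lower fn).toList ['_'] 0
      (Nat.zero_le _)
    rw [show ((0 : ℕ) : ℤ) = 0 from rfl] at hspec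
    simp only [PySem.Chars.findFrom_zero] at hspec
    obtain ⟨hF0, hpre, hminp⟩ := hspec hneg
    obtain ⟨j, hj⟩ : ∃ j : ℕ, (PySem.Chars.find (PySem.Str.lower fn).toList ['_']).toNat = j :=
      ⟨_, rfl⟩
    rw [hj] at hpre hminp
    have hjget : (PySem.Str.lower fn).toList[j]? = some '_' :=
      (pv_singleton_prefix_iff '_' _ j).mp hpre
    have hmin : ∀ i, i < j → (PySem.Str.lower fn).toList[i]? ≠ some '_' := fun i hi h =>
      hminp i (Nat.zero_le _) hi ((pv_singleton_prefix_iff '_' _ i).mpr h)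
    have hkey : (PySem.Str.slice (PySem.Str.lower fn) none
        (some (PySem.Chars.find (PySem.Str.lower fn).toList ['_'] + 1))).toList
        = (PySem.Str.lower fn).toList.take (j + 1) := by
      rw [PySem.Str.toList_slice, PySem.Chars.slice_eq_listSlice,
        PySem.List.slice_to _ (show (0:ℤ) ≤ _ + 1 by omega)]
      congr 1
      omega
    have hc := fun (p : String) (q : List Char) hp hq =>
      pv_cond_eq (PySem.Str.lower fn) _ p j hkey hjget hmin q hp hq
    rw [hmk, hitems, PySem.Dict.getD_eq_get?_getD]
    simp only [pvLoopA, PySem.Dict.get?_mk_cons]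
    rw [hc "chat_" ['c','h','a','t'] (by decide) (by decide),
        hc "model_" ['m','o','d','e','l'] (by decide) (by decide),
        hc "file_" ['f','i','l','e'] (by decide) (by decide),
        hc "upload_" ['u','p','l','o','a','d'] (by decide) (by decide),
        hc "database_" ['d','a','t','a','b','a','s','e'] (by decide) (by decide),
        hc "memory_" ['m','e','m','o','r','y'] (by decide) (by decide),
        hc "workflow_" ['w','o','r','k','f','l','o','w'] (by decide) (by decide),
        hc "agent_" ['a','g','e','n','t'] (by decide) (by decide),
        hc "monitor_" ['m','o','n','i','t','o','r'] (by decide) (by decide),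
        hc "config_" ['c','o','n','f','i','g'] (by decide) (by decide),
        hc "setting_" ['s','e','t','t','i','n','g'] (by decide) (by decide)]
    have hnil : ∀ k : String, (PySem.Dict.mk ([] : List (String × String))).get? k = none :=
      fun _ => rfl
    simp only [hnil, apply_ite (fun o : Option String => o.getD "Dashboard Interface"),
      Option.getD_some, Option.getD_none]
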